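-- pv_equiv track=rewrite | github.com/GeonHyeongKim/2022-2-Algorithm-Study | src/chanhyun/week2/test3-3.py | solution
-- ===== SOURCE A (Python) =====
-- def solution(distance, scope, times):
--     answer = distance
--     for i in range(len(scope)):
--         scope[i].sort()
--         for t in range(scope[i][0], scope[i][1]+1):
--             x = t % (times[i][0]+times[i][1])
--             if 0<x<=times[i][0]:
--                 answer = min(answer, t)
--     return answer
-- ===== SOURCE B (Python) =====
-- def solution(distance, scope, times):
--     # Compute each interval's first valid time directly by modular arithmetic
--     # instead of scanning the interval time unit by time unit.
--     answer = distance
--     for interval, wr in zip(scope, times):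
--         s = sorted(interval)
--         lo, hi = s[0], s[1]
--         work, rest = wr[0], wr[1]
--         period = work + rest
--         if work <= 0 or period <= 1:
--             continue  # no t satisfies 0 < t % period <= work
--         x = lo % period
--         t = lo if 0 < x <= work else lo + (1 - x) % period
--         if t <= hi:
--             answer = min(answer, t)
--     return answer
-- ===== Notes on version B (the rewrite author's own statement) =====
-- stated objective: alternative
-- what changed: A scans every time unit t of each interval testing t % period; B computes the first valid time of each interval directly by modular arithmetic, so the per-interval scan disappears.
import Mathlib
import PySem

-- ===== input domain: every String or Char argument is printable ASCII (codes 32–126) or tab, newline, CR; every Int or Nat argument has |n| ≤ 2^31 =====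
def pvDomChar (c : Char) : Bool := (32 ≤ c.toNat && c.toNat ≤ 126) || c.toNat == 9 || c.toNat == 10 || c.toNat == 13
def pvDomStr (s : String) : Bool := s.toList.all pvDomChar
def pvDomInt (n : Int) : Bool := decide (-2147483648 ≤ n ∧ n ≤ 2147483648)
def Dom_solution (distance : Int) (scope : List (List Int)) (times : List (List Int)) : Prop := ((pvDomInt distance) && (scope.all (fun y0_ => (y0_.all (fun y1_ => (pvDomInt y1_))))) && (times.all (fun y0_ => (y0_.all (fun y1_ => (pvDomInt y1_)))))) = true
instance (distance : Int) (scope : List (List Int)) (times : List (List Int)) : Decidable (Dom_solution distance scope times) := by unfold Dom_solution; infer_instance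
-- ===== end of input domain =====

-- B computes the first valid time of each interval directly by modular arithmetic,
-- where A scans the interval time unit by time unit.  A sorts each scope row in place;
-- the equivalence proved here is about the return value only (B does not mutate).

-- ===== PORT A =====
def solution (distance : Int) (scope : List (List Int)) (times : List (List Int)) : Int :=
  (PySem.List.pyRange 0 (PySem.List.len scope) 1).foldl
    (fun answer i =>
      let row := PySem.List.sorted (PySem.List.pyGetD scope i []) (fun x => x) false
      (PySem.List.pyRange (PySem.List.pyGetD row 0 0) (PySem.List.pyGetD row 1 0 + 1) 1).foldl
        (fun answer t =>
          let x := PySem.Int.mod t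
            (PySem.List.pyGetD (PySem.List.pyGetD times i []) 0 0 +
             PySem.List.pyGetD (PySem.List.pyGetD times i []) 1 0)
          if 0 < x ∧ x ≤ PySem.List.pyGetD (PySem.List.pyGetD times i []) 0 0 then min answer t
          else answer)
        answer)
    distance

-- ===== PORT B =====
def solution_alt (distance : Int) (scope : List (List Int)) (times : List (List Int)) : Int :=
  (scope.zip times).foldl
    (fun answer pr =>
      let s := PySem.List.sorted pr.1 (fun x => x) false
      let lo := PySem.List.pyGetD s 0 0
      let hi := PySem.List.pyGetD s 1 0
      let work := PySem.List.pyGetD pr.2 0 0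
      let rest := PySem.List.pyGetD pr.2 1 0
      let period := work + rest
      if work ≤ 0 ∨ period ≤ 1 then answer
      else
        let x := PySem.Int.mod lo period
        let t := if 0 < x ∧ x ≤ work then lo else lo + PySem.Int.mod (1 - x) period
        if t ≤ hi then min answer t else answer)
    distance

-- ===== PRECONDITION & SPEC =====
-- Pre_ excludes exactly the inputs on which Python A raises: a scope row shorter than 2
-- (IndexError on scope[i][1]), times not covering scope (IndexError on times[i]), a used
-- times row shorter than 2 (IndexError), or a used period summing to 0 (ZeroDivisionError).
def Pre_solution (distance : Int) (scope : List (List Int)) (times : List (List Int)) : Prop :=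
  scope.length ≤ times.length ∧
  (∀ y ∈ scope, 2 ≤ y.length) ∧
  (∀ y ∈ times.take scope.length, 2 ≤ y.length ∧ y.getD 0 0 + y.getD 1 0 ≠ 0)
instance (distance : Int) (scope : List (List Int)) (times : List (List Int)) : Decidable (Pre_solution distance scope times) := by unfold Pre_solution; infer_instance
def pvWitness_solution : Int × List (List Int) × List (List Int) := (10, [[1, 3]], [[2, 3]])

def Spec_solution (distance : Int) (scope : List (List Int)) (times : List (List Int)) (out : Int) : Prop := out = solution_alt distance scope times
instance (distance : Int) (scope : List (List Int)) (times : List (List Int)) (out : Int) : Decidable (Spec_solution distance scope times out) := by unfold Spec_solution; infer_instance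

-- ===== CLAIM (what is proved, stated in full; the proofs are below) =====
def Claim_equal_solution : Prop := ∀ (distance : Int) (scope : List (List Int)) (times : List (List Int)), Dom_solution distance scope times → Pre_solution distance scope times → Spec_solution distance scope times (solution distance scope times)

-- ===== LEMMAS AND PROOFS =====

-- One interval as A computes it / as B computes it (proof-only abbreviations).
def pvA (row trow : List Int) (answer : Int) : Int :=
  (PySem.List.pyRange (PySem.List.pyGetD (PySem.List.sorted row (fun x => x) false) 0 0)
      (PySem.List.pyGetD (PySem.List.sorted row (fun x => x) false) 1 0 + 1) 1).foldl
    (fun answer t =>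
      let x := PySem.Int.mod t (PySem.List.pyGetD trow 0 0 + PySem.List.pyGetD trow 1 0)
      if 0 < x ∧ x ≤ PySem.List.pyGetD trow 0 0 then min answer t else answer)
    answer

def pvB (row trow : List Int) (answer : Int) : Int :=
  let s := PySem.List.sorted row (fun x => x) false
  let lo := PySem.List.pyGetD s 0 0
  let hi := PySem.List.pyGetD s 1 0
  let work := PySem.List.pyGetD trow 0 0
  let rest := PySem.List.pyGetD trow 1 0
  let period := work + rest
  if work ≤ 0 ∨ period ≤ 1 then answer
  else
    let x := PySem.Int.mod lo period
    let t := if 0 < x ∧ x ≤ work then lo else lo + PySem.Int.mod (1 - x) period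
    if t ≤ hi then min answer t else answer

lemma pv_foldl_fix {f : Int → Int → Int} : ∀ (l : List Int) (c : Int),
    (∀ t ∈ l, f c t = c) → l.foldl f c = c := by
  intro l
  induction l with
  | nil => intro c _; rfl
  | cons a l ih =>
    intro c h
    rw [List.foldl_cons, h a (List.mem_cons_self)]
    exact ih c (fun t ht => h t (List.mem_cons_of_mem a ht))

lemma pv_emod_shift (p lo e : Int) : (lo + e) % p = (lo % p + e) % p := by
  conv_lhs => rw [← Int.emod_add_ediv lo p]
  rw [show lo % p + p * (lo / p) + e = lo % p + e + p * (lo / p) by ring,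
    Int.add_mul_emod_self_left]

-- Fold of "min with the first valid element": only the first valid element matters.
lemma pv_fold_first (P : Int → Prop) [DecidablePred P] (lo hi tB ans : Int)
    (h1 : lo ≤ tB) (h2 : P tB) (h3 : ∀ t, lo ≤ t → t < tB → ¬ P t) :
    (PySem.List.pyRange lo (hi + 1) 1).foldl (fun acc t => if P t then min acc t else acc) ans
      = if tB ≤ hi then min ans tB else ans := by
  by_cases htb : tB ≤ hi
  · rw [if_pos htb,
      PySem.List.pyRange_one_append lo tB (hi + 1) h1 (by omega),
      List.foldl_append,
      PySem.List.pyRange_one_cons (show tB < hi + 1 by omega), List.foldl_cons]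
    have e1 : (PySem.List.pyRange lo tB 1).foldl (fun acc t => if P t then min acc t else acc) ans = ans := by
      apply pv_foldl_fix
      intro t ht
      obtain ⟨ha, hb⟩ := PySem.List.mem_pyRange_one.mp ht
      rw [if_neg (h3 t ha hb)]
    rw [e1, if_pos h2]
    apply pv_foldl_fix
    intro t ht
    obtain ⟨ha, _⟩ := PySem.List.mem_pyRange_one.mp ht
    have hle : min ans tB ≤ t := le_trans (min_le_right ans tB) (by omega)
    split_ifs
    · exact min_eq_left hle
    · rfl
  · rw [if_neg htb]
    apply pv_foldl_fix
    intro t ht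
    obtain ⟨ha, hb⟩ := PySem.List.mem_pyRange_one.mp ht
    rw [if_neg (h3 t ha (by omega))]

-- The crux: A's inner scan over one interval equals B's O(1) modular computation.
lemma pv_inner (w r lo hi ans : Int) (hp : w + r ≠ 0) :
    (PySem.List.pyRange lo (hi + 1) 1).foldl
      (fun acc t =>
        if 0 < PySem.Int.mod t (w + r) ∧ PySem.Int.mod t (w + r) ≤ w then min acc t else acc) ans
      = if w ≤ 0 ∨ w + r ≤ 1 then ans
        else
          let x := PySem.Int.mod lo (w + r)
          let t := if 0 < x ∧ x ≤ w then lo else lo + PySem.Int.mod (1 - x) (w + r)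
          if t ≤ hi then min ans t else ans := by
  by_cases hg : w ≤ 0 ∨ w + r ≤ 1
  · rw [if_pos hg]
    apply pv_foldl_fix
    intro t _
    have hnv : ¬ (0 < PySem.Int.mod t (w + r) ∧ PySem.Int.mod t (w + r) ≤ w) := by
      rcases lt_trichotomy (w + r) 0 with hneg | hzero | hpos
      · have := PySem.Int.mod_neg_bounds t hneg
        intro hc; omega
      · exact absurd hzero hp
      · have h1 := PySem.Int.mod_nonneg t hpos
        have h2 := PySem.Int.mod_lt t hpos
        intro hc; omega
    rw [if_neg hnv]
  · rw [if_neg hg]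
    push_neg at hg
    obtain ⟨hw, hp1⟩ := hg
    have hp0 : 0 < w + r := by omega
    simp only [PySem.Int.mod_eq_emod_of_pos hp0]
    have hx0 : 0 ≤ lo % (w + r) := Int.emod_nonneg lo (by omega)
    have hxp : lo % (w + r) < w + r := Int.emod_lt_of_pos lo hp0
    by_cases hv : 0 < lo % (w + r) ∧ lo % (w + r) ≤ w
    · simp only [if_pos hv]
      exact pv_fold_first _ lo hi lo ans le_rfl hv (fun t h1 h2 => absurd h1 (by omega))
    · simp only [if_neg hv]
      -- the candidate is lo + m where m = (1 - lo % p) % p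
      have hm_val : (1 - lo % (w + r)) % (w + r)
          = if lo % (w + r) = 0 then 1 else 1 - lo % (w + r) + (w + r) := by
        by_cases h0 : lo % (w + r) = 0
        · rw [if_pos h0, h0]
          exact Int.emod_eq_of_lt (by omega) (by omega)
        · rw [if_neg h0]
          have hwx : w < lo % (w + r) := by
            rcases (not_and_or.mp hv) with h | h
            · omega
            · omega
          have he : (1 - lo % (w + r)) % (w + r) = (1 - lo % (w + r) + (w + r)) % (w + r) := by
            have := Int.add_mul_emod_self_left (1 - lo % (w + r)) (w + r) 1
            simpa using this.symm
          rw [he]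
          exact Int.emod_eq_of_lt (by omega) (by omega)
      set m := (1 - lo % (w + r)) % (w + r) with hm
      have hm_lb : 1 ≤ m := by rw [hm_val]; split_ifs <;> omega
      have hm_ub : m ≤ w + r := by rw [hm_val]; split_ifs <;> omega
      have hres : ∀ e : Int, 0 ≤ e → e ≤ m → (lo + e) % (w + r) = lo % (w + r) + e -
          (if (w + r) ≤ lo % (w + r) + e then (w + r) else 0) := by
        intro e he0 hem
        rw [pv_emod_shift]
        by_cases hbig : (w + r) ≤ lo % (w + r) + e
        · rw [if_pos hbig]
          have key : (lo % (w + r) + e) % (w + r) = (lo % (w + r) + e - (w + r)) % (w + r) := by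
            conv_lhs => rw [show lo % (w + r) + e = (lo % (w + r) + e - (w + r)) + (w + r) * 1 by ring]
            rw [Int.add_mul_emod_self_left]
          rw [key]
          exact Int.emod_eq_of_lt (a := lo % (w + r) + e - (w + r)) (b := w + r)
            (by omega) (by omega)
        · rw [if_neg hbig, sub_zero]
          exact Int.emod_eq_of_lt (a := lo % (w + r) + e) (b := w + r)
            (by omega) (by omega)
      have hvalid : 0 < (lo + m) % (w + r) ∧ (lo + m) % (w + r) ≤ w := by
        have := hres m (by omega) le_rfl
        rw [this]
        rw [hm_val]
        split_ifs <;> omega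
      have hinv : ∀ t, lo ≤ t → t < lo + m →
          ¬ (0 < t % (w + r) ∧ t % (w + r) ≤ w) := by
        intro t h1 h2
        have ht : t = lo + (t - lo) := by ring
        rw [ht, hres (t - lo) (by omega) (by omega)]
        have hwx : lo % (w + r) = 0 ∨ w < lo % (w + r) := by
          rcases (not_and_or.mp hv) with h | h
          · omega
          · omega
        have hm2 : t - lo < m := by omega
        rw [hm_val] at hm2
        split_ifs with hb
        · intro hc
          rcases hwx with h | h <;> split_ifs at hm2 <;> omega
        · intro hc
          rcases hwx with h | h <;> split_ifs at hm2 <;> omega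
      exact pv_fold_first _ lo hi (lo + m) ans (by omega) hvalid hinv

lemma pv_step_eq (row trow : List Int) (ans : Int)
    (hp : trow.getD 0 0 + trow.getD 1 0 ≠ 0) : pvA row trow ans = pvB row trow ans := by
  have hp' : PySem.List.pyGetD trow 0 0 + PySem.List.pyGetD trow 1 0 ≠ 0 := by
    simpa [PySem.List.pyGetD_zero, PySem.List.pyGetD_ofNat'] using hp
  exact pv_inner (PySem.List.pyGetD trow 0 0) (PySem.List.pyGetD trow 1 0)
    (PySem.List.pyGetD (PySem.List.sorted row (fun x => x) false) 0 0)
    (PySem.List.pyGetD (PySem.List.sorted row (fun x => x) false) 1 0) ans hp'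

lemma pv_outer : ∀ (sc tm : List (List Int)) (ans : Int),
    sc.length ≤ tm.length →
    (∀ y ∈ tm.take sc.length, y.getD 0 0 + y.getD 1 0 ≠ 0) →
    (List.range sc.length).foldl (fun answer k => pvA (sc.getD k []) (tm.getD k []) answer) ans
      = (sc.zip tm).foldl (fun answer pr => pvB pr.1 pr.2 answer) ans := by
  intro sc
  induction sc with
  | nil => intro tm ans _ _; simp
  | cons s sc ih =>
    intro tm ans hlen hp
    cases tm with
    | nil => simp at hlen
    | cons t tm =>
      have hp0 : t.getD 0 0 + t.getD 1 0 ≠ 0 := by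
        have := hp t (by simp [List.take]); exact this
      rw [List.length_cons, List.range_succ_eq_map, List.foldl_cons, List.foldl_map]
      simp only [List.getD_cons_zero, List.getD_cons_succ]
      rw [pv_step_eq s t ans hp0]
      rw [List.zip_cons_cons, List.foldl_cons]
      exact ih tm (pvB s t ans) (by simpa using hlen)
        (fun y hy => hp y (by simpa [List.take] using List.mem_cons_of_mem t hy))

-- ===== VERDICT (by name: the statement is the Claim_ definition above) =====
theorem solution_spec : Claim_equal_solution := by
  intro distance scope times _ hpre
  obtain ⟨hlen, _, hrows⟩ := hpre
  show solution distance scope times = solution_alt distance scope times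
  have hA : solution distance scope times
      = (List.range scope.length).foldl
          (fun answer k => pvA (scope.getD k []) (times.getD k []) answer) distance := by
    simp only [solution, pvA, PySem.List.len_eq, PySem.List.pyRange_zero_nat,
      List.foldl_map, PySem.List.pyGetD_natCast]
  have hB : solution_alt distance scope times
      = (scope.zip times).foldl (fun answer pr => pvB pr.1 pr.2 answer) distance := rfl
  rw [hA, hB]
  exact pv_outer scope times distance hlen (fun y hy => (hrows y hy).2)
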